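-- pv_equiv track=rewrite | github.com/maciej-janusz/asd | dynamic_programming/29_05/ferry.py | ferry_rec
-- ===== SOURCE A (Python) =====
-- def ferry_rec(L, N, A):
--     memo = {}
--
--     def rec(l, r, k):
--         if (l, r, k) in memo:
--             return memo[(l, r, k)]
--
--         if l < 0 or r < 0:
--             result = False
--         elif k == 0:
--             result = True
--         else:
--             result = rec(l-A[k-1], r, k-1) or rec(l, r-A[k-1], k-1)
--
--         memo[(l, r, k)] = result
--         return result
--
--     for k in range(N, -1, -1):
--         if rec(L, L, k):
--             return k
-- ===== SOURCE B (Python) =====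
-- def ferry_rec(L, N, A):
--     # Iterative layered set DP instead of the memoized two-capacity recursion:
--     # for each candidate prefix length k (largest first), process the prefix
--     # from the last car to the first, keeping the set of possible remaining
--     # capacities l of the first lane; the second lane's remainder is then
--     # determined as 2*L - total - l.
--     for k in range(N, -1, -1):
--         if L < 0:
--             continue
--         reach = {L}
--         total = 0
--         for a in reversed(A[:k]):
--             total += a
--             nxt = set()
--             for l in reach:
--                 if l - a >= 0:
--                     nxt.add(l - a)
--                 if 2 * L - total - l >= 0:
--                     nxt.add(l)
--             reach = nxt
--             if not reach:
--                 break
--         if reach: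
--             return k
-- ===== Notes on version B (the rewrite author's own statement) =====
-- stated objective: alternative
-- what changed: A's memoized recursion over pairs of remaining capacities (l, r) is replaced by an iterative layered set DP that, per candidate prefix, sweeps the reversed prefix once maintaining only the set of reachable first-lane capacities (the second lane's remainder is determined by the running total), with an early break when the set empties.
-- outside the precondition, e.g. on ferry_rec(-1, 1, [1]): A returns None, B returns None; on ferry_rec(5, -1, [1]): A returns None, B returns None
import Mathlib
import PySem

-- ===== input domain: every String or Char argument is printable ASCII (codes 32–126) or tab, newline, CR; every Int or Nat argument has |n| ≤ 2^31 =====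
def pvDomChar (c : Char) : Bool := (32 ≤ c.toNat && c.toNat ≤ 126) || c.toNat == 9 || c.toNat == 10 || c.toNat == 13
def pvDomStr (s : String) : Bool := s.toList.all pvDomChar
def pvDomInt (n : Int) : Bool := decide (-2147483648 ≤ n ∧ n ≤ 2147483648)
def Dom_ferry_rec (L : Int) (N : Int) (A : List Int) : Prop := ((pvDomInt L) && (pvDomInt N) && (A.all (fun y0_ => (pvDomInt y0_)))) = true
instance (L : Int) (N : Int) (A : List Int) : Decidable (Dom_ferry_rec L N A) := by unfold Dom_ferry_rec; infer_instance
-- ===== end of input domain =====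

-- B replaces A's memoized two-capacity recursion by an iterative layered set DP over
-- remaining first-lane capacities (alternative algorithm, similar cost).

-- ===== PORT A =====
-- rec(l, r, k) with the memo dict threaded through; k is the Nat recursion depth
-- (every call in A has k ≥ 0); the memo key stores it as the Int k, as Python does.
-- A[k-1] is PySem.List.pyGet?; the .getD 0 is unreachable under Pre_ (k ≤ len(A)).
def ferryRecA (A : List Int) (k : Nat) (l r : Int)
    (memo : PySem.Dict (Int × Int × Int) Bool) :
    Bool × PySem.Dict (Int × Int × Int) Bool :=
  match memo.get? (l, r, (k : Int)) with
  | some b => (b, memo)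
  | none =>
    let rm : Bool × PySem.Dict (Int × Int × Int) Bool :=
      if l < 0 ∨ r < 0 then (false, memo)
      else
        match k with
        | 0 => (true, memo)
        | Nat.succ k' =>
          let a := (PySem.List.pyGet? A (k' : Int)).getD 0
          let p := ferryRecA A k' (l - a) r memo
          if p.1 then (true, p.2) else ferryRecA A k' l (r - a) p.2
    (rm.1, rm.2.insert (l, r, (k : Int)) rm.1)

-- for k in range(N, -1, -1): if rec(L, L, k): return k   (memo persists across iterations)
-- Python falls off returning None when no k succeeds; that happens only outside Pre_
-- (L < 0 or N < 0), where this port returns 0.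
def ferryLoopA (A : List Int) (L : Int) :
    List Int → PySem.Dict (Int × Int × Int) Bool → Int
  | [], _ => 0
  | k :: ks, memo =>
    let p := ferryRecA A k.toNat L L memo   -- every k in range(N, -1, -1) is ≥ 0, so toNat is exact
    if p.1 then k else ferryLoopA A L ks p.2

def ferry_rec (L : Int) (N : Int) (A : List Int) : Int :=
  ferryLoopA A L (PySem.List.pyRange N (-1) (-1)) PySem.Dict.empty

-- ===== PORT B =====
-- body of B's inner 'for l in reach' loop: the two conditional inserts into nxt
def ferryAddB (L total a : Int) (nxt : PySem.Set Int) (l : Int) : PySem.Set Int :=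
  let nxt := if 0 ≤ l - a then PySem.Set.add nxt (l - a) else nxt
  if 0 ≤ 2 * L - total - l then PySem.Set.add nxt l else nxt

def ferryStepB (L total a : Int) (reach : PySem.Set Int) : PySem.Set Int :=
  reach.foldl (ferryAddB L total a) PySem.Set.empty

-- 'for a in reversed(A[:k]): …' with the early break when reach becomes empty
def ferryDpB (L : Int) : List Int → Int → PySem.Set Int → PySem.Set Int
  | [], _, reach => reach
  | a :: rest, total, reach =>
    let total := total + a
    let nxt := ferryStepB L total a reach
    if nxt = [] then nxt else ferryDpB L rest total nxt

-- 'for k in range(N, -1, -1): …'; Python falls off returning None when no k succeeds,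
-- which happens only outside Pre_ (L < 0 or N < 0), where this port returns 0.
def ferryLoopB (L : Int) (A : List Int) : List Int → Int
  | [] => 0
  | k :: ks =>
    if L < 0 then ferryLoopB L A ks
    else
      let reach := ferryDpB L (PySem.List.slice A none (some k)).reverse 0 (PySem.Set.ofList [L])
      if reach ≠ [] then k else ferryLoopB L A ks

def ferry_rec_alt (L : Int) (N : Int) (A : List Int) : Int :=
  ferryLoopB L A (PySem.List.pyRange N (-1) (-1))

-- ===== PRECONDITION & SPEC =====
-- Pre_ excludes exactly: N > len(A), where A raises IndexError, and L < 0 or N < 0,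
-- where A's loop finds no k and Python falls off returning None (not an int).
def Pre_ferry_rec (L : Int) (N : Int) (A : List Int) : Prop :=
  0 ≤ L ∧ 0 ≤ N ∧ N ≤ A.length
instance (L : Int) (N : Int) (A : List Int) : Decidable (Pre_ferry_rec L N A) := by
  unfold Pre_ferry_rec; infer_instance

def pvWitness_ferry_rec : Int × Int × List Int := (3, 2, [2, 3])

def Spec_ferry_rec (L : Int) (N : Int) (A : List Int) (out : Int) : Prop := out = ferry_rec_alt L N A
instance (L : Int) (N : Int) (A : List Int) (out : Int) : Decidable (Spec_ferry_rec L N A out) := by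
  unfold Spec_ferry_rec; infer_instance

-- ===== CLAIM (what is proved, stated in full; the proofs are below) =====
def Claim_equal_ferry_rec : Prop := ∀ (L : Int) (N : Int) (A : List Int), Dom_ferry_rec L N A → Pre_ferry_rec L N A → Spec_ferry_rec L N A (ferry_rec L N A)

-- ===== LEMMAS AND PROOFS =====

-- Pure meaning of A's rec: the two remaining capacities against the reversed prefix.
def ferryG : Int → Int → List Int → Bool
  | l, r, [] => if l < 0 ∨ r < 0 then false else true
  | l, r, a :: rest =>
    if l < 0 ∨ r < 0 then false else (ferryG (l - a) r rest || ferryG l (r - a) rest)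

lemma ferryG_neg (l r : Int) (xs : List Int) (h : l < 0 ∨ r < 0) : ferryG l r xs = false := by
  cases xs <;> simp [ferryG, h]

-- memo invariant: every stored entry is the pure value
def GoodMemo (A : List Int) (memo : PySem.Dict (Int × Int × Int) Bool) : Prop :=
  ∀ (l r : Int) (k : Nat) (b : Bool), k ≤ A.length →
    memo.get? (l, r, (k : Int)) = some b → b = ferryG l r ((A.take k).reverse)

lemma goodMemo_insert {A : List Int} {memo : PySem.Dict (Int × Int × Int) Bool}
    (hG : GoodMemo A memo) (l r : Int) (k : Nat) (b : Bool)
    (hb : b = ferryG l r ((A.take k).reverse)) :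
    GoodMemo A (memo.insert (l, r, (k : Int)) b) := by
  intro l' r' k' b' hk' hget'
  rw [PySem.Dict.get?_insert] at hget'
  split_ifs at hget' with he
  · simp only [Prod.mk.injEq] at he
    obtain ⟨rfl, rfl, h3⟩ := he
    have hkk : k' = k := by exact_mod_cast h3
    subst hkk
    cases hget'
    exact hb
  · exact hG l' r' k' b' hk' hget'

lemma take_succ_reverse (A : List Int) (k : Nat) (hk : k < A.length) :
    (A.take (k + 1)).reverse = (PySem.List.pyGet? A (k : Int)).getD 0 :: (A.take k).reverse := by
  rw [List.take_add_one]
  simp [List.getElem?_eq_getElem hk]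

lemma ferryRecA_correct (A : List Int) :
    ∀ (k : Nat), k ≤ A.length → ∀ (l r : Int) memo, GoodMemo A memo →
      (ferryRecA A k l r memo).1 = ferryG l r ((A.take k).reverse) ∧
      GoodMemo A (ferryRecA A k l r memo).2 := by
  intro k
  induction k with
  | zero =>
    intro _ l r memo hG
    rw [ferryRecA]
    cases hget : memo.get? (l, r, ((0 : Nat) : Int)) with
    | some b => simpa [hget] using ⟨hG l r 0 b (by simp) hget, hG⟩
    | none =>
      by_cases hneg : l < 0 ∨ r < 0
      · simp only [if_pos hneg]
        exact ⟨by simp [ferryG_neg _ _ _ hneg],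
          goodMemo_insert hG l r 0 false (by simp [ferryG_neg _ _ _ hneg])⟩
      · simp only [if_neg hneg]
        exact ⟨by simp [ferryG, hneg],
          goodMemo_insert hG l r 0 true (by simp [ferryG, hneg])⟩
  | succ k' ih =>
    intro hk l r memo hG
    have hk' : k' ≤ A.length := Nat.le_of_succ_le hk
    have hrev := take_succ_reverse A k' (Nat.lt_of_succ_le hk)
    rw [ferryRecA]
    cases hget : memo.get? (l, r, ((k' + 1 : Nat) : Int)) with
    | some b => simpa [hget] using ⟨hG l r (k' + 1) b hk hget, hG⟩
    | none =>
      by_cases hneg : l < 0 ∨ r < 0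
      · simp only [if_pos hneg]
        exact ⟨by simp [ferryG_neg _ _ _ hneg],
          goodMemo_insert hG l r (k' + 1) false (by simp [ferryG_neg _ _ _ hneg])⟩
      · simp only [if_neg hneg]
        set a := (PySem.List.pyGet? A (k' : Int)).getD 0 with ha
        obtain ⟨h1, hG1⟩ := ih hk' (l - a) r memo hG
        have hGcons : ferryG l r ((A.take (k' + 1)).reverse)
            = (ferryG (l - a) r ((A.take k').reverse) || ferryG l (r - a) ((A.take k').reverse)) := by
          rw [hrev]
          simp [ferryG, hneg]
        cases hp : (ferryRecA A k' (l - a) r memo).1 with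
        | true =>
          simp only [if_true]
          have hval : ferryG l r ((A.take (k' + 1)).reverse) = true := by
            rw [hGcons, ← h1, hp]; simp
          exact ⟨by simp [hval], goodMemo_insert hG1 l r (k' + 1) true hval.symm⟩
        | false =>
          simp only [Bool.false_eq_true, if_false]
          obtain ⟨h2, hG2⟩ := ih hk' l (r - a) (ferryRecA A k' (l - a) r memo).2 hG1
          have hres : (ferryRecA A k' l (r - a) (ferryRecA A k' (l - a) r memo).2).1
              = ferryG l r ((A.take (k' + 1)).reverse) := by
            rw [h2, hGcons, ← h1, hp]
            simp
          exact ⟨hres, goodMemo_insert hG2 l r (k' + 1) _ hres⟩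

-- ---- B side ----

lemma mem_ferryAddB (L total a : Int) (s : PySem.Set Int) (l x : Int) :
    x ∈ ferryAddB L total a s l ↔
      x ∈ s ∨ (x = l - a ∧ 0 ≤ l - a) ∨ (x = l ∧ 0 ≤ 2 * L - total - l) := by
  unfold ferryAddB
  by_cases hc1 : 0 ≤ l - a <;> by_cases hc2 : 0 ≤ 2 * L - total - l
  · simp [show a ≤ l by omega, show l ≤ 2 * L - total by omega, PySem.Set.mem_add, or_assoc]
  · simp [show a ≤ l by omega, show ¬(l ≤ 2 * L - total) by omega, PySem.Set.mem_add]
  · simp [show ¬(a ≤ l) by omega, show l ≤ 2 * L - total by omega, PySem.Set.mem_add]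
  · simp [show ¬(a ≤ l) by omega, show ¬(l ≤ 2 * L - total) by omega]

lemma mem_ferryStepB_fold (L total a : Int) :
    ∀ (ls : List Int) (s : PySem.Set Int) (x : Int),
      x ∈ ls.foldl (ferryAddB L total a) s ↔
        x ∈ s ∨ ∃ l ∈ ls, (x = l - a ∧ 0 ≤ l - a) ∨ (x = l ∧ 0 ≤ 2 * L - total - l) := by
  intro ls
  induction ls with
  | nil => simp
  | cons l ls ih =>
    intro s x
    rw [List.foldl_cons, ih, mem_ferryAddB]
    simp only [List.mem_cons, exists_eq_or_imp]
    exact or_assoc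

lemma mem_ferryStepB (L total a : Int) (reach : PySem.Set Int) (x : Int) :
    x ∈ ferryStepB L total a reach ↔
      ∃ l ∈ reach, (x = l - a ∧ 0 ≤ l - a) ∨ (x = l ∧ 0 ≤ 2 * L - total - l) := by
  unfold ferryStepB
  rw [mem_ferryStepB_fold]
  simp [PySem.Set.empty]

lemma ferryG_cons_of_nonneg (l r a : Int) (rest : List Int) (hl : 0 ≤ l) (hr : 0 ≤ r) :
    ferryG l r (a :: rest) = (ferryG (l - a) r rest || ferryG l (r - a) rest) := by
  have h : ¬(l < 0 ∨ r < 0) := by omega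
  simp only [ferryG, h, if_false]

lemma ferryDpB_spec (L : Int) :
    ∀ (xs : List Int) (total : Int) (reach : PySem.Set Int),
      (∀ l ∈ reach, 0 ≤ l ∧ 0 ≤ 2 * L - total - l) →
      (ferryDpB L xs total reach ≠ [] ↔
        ∃ l ∈ reach, ferryG l (2 * L - total - l) xs = true) := by
  intro xs
  induction xs with
  | nil =>
    intro total reach hInv
    simp only [ferryDpB]
    constructor
    · intro hne
      obtain ⟨l, hl⟩ := List.exists_mem_of_ne_nil _ hne
      refine ⟨l, hl, ?_⟩
      have := hInv l hl
      simp [ferryG]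
      omega
    · rintro ⟨l, hl, -⟩ hnil
      simp [hnil] at hl
  | cons a rest ih =>
    intro total reach hInv
    have hmem := mem_ferryStepB L (total + a) a reach
    have hInv' : ∀ x ∈ ferryStepB L (total + a) a reach,
        0 ≤ x ∧ 0 ≤ 2 * L - (total + a) - x := by
      intro x hx
      rcases (hmem x).1 hx with ⟨l, hl, hcase⟩
      have := hInv l hl
      rcases hcase with ⟨rfl, h⟩ | ⟨rfl, h⟩ <;> omega
    have key : (∃ x ∈ ferryStepB L (total + a) a reach,
        ferryG x (2 * L - (total + a) - x) rest = true) ↔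
        (∃ l ∈ reach, ferryG l (2 * L - total - l) (a :: rest) = true) := by
      constructor
      · rintro ⟨x, hx, hGx⟩
        obtain ⟨l, hl, hcase⟩ := (hmem x).1 hx
        have hi := hInv l hl
        refine ⟨l, hl, ?_⟩
        rw [ferryG_cons_of_nonneg l (2 * L - total - l) a rest (by omega) (by omega)]
        rcases hcase with ⟨hxe, h⟩ | ⟨hxe, h⟩
        · rw [hxe, show 2 * L - (total + a) - (l - a) = 2 * L - total - l by ring] at hGx
          simp [hGx]
        · rw [hxe, show 2 * L - (total + a) - l = 2 * L - total - l - a by ring] at hGx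
          simp [hGx]
      · rintro ⟨l, hl, hGl⟩
        have hi := hInv l hl
        rw [ferryG_cons_of_nonneg l (2 * L - total - l) a rest (by omega) (by omega)] at hGl
        rcases Bool.or_eq_true_iff.mp hGl with hb | hb
        · have hla : 0 ≤ l - a := by
            by_contra hc
            rw [ferryG_neg _ _ _ (Or.inl (by omega))] at hb
            exact absurd hb (by simp)
          exact ⟨l - a, (hmem _).2 ⟨l, hl, Or.inl ⟨rfl, hla⟩⟩,
            by rw [show 2 * L - (total + a) - (l - a) = 2 * L - total - l by ring]; exact hb⟩
        · have hra : 0 ≤ 2 * L - (total + a) - l := by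
            by_contra hc
            rw [ferryG_neg _ _ _ (Or.inr (by omega))] at hb
            exact absurd hb (by simp)
          exact ⟨l, (hmem _).2 ⟨l, hl, Or.inr ⟨rfl, hra⟩⟩,
            by rw [show 2 * L - (total + a) - l = 2 * L - total - l - a by ring]; exact hb⟩
    by_cases hnil : ferryStepB L (total + a) a reach = []
    · have hLHS : ferryDpB L (a :: rest) total reach = [] := by
        simp [ferryDpB, hnil]
      rw [hLHS]
      simp only [ne_eq, not_true_eq_false, false_iff]
      intro hcon
      obtain ⟨x, hx, -⟩ := key.2 hcon
      rw [hnil] at hx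
      simp at hx
    · have hLHS : ferryDpB L (a :: rest) total reach
          = ferryDpB L rest (total + a) (ferryStepB L (total + a) a reach) := by
        simp [ferryDpB, hnil]
      rw [hLHS, ih (total + a) _ hInv', key]

lemma ferryB_check (L : Int) (A : List Int) (k : Int) (hk0 : 0 ≤ k) (hL : 0 ≤ L) :
    (ferryDpB L (PySem.List.slice A none (some k)).reverse 0 (PySem.Set.ofList [L]) ≠ [])
      ↔ ferryG L L ((A.take k.toNat).reverse) = true := by
  rw [PySem.List.slice_to _ hk0]
  have hone : PySem.Set.ofList [L] = [L] := by
    apply PySem.Set.ofList_eq_self_of_nodup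
    simp
  rw [hone, ferryDpB_spec L _ 0 [L] (by intro l hl; simp at hl; omega)]
  constructor
  · rintro ⟨l, hl, hG⟩
    simp only [List.mem_singleton] at hl
    rw [hl, show 2 * L - 0 - L = L by ring] at hG
    exact hG
  · intro hG
    refine ⟨L, by simp, ?_⟩
    rw [show 2 * L - 0 - L = L by ring]
    exact hG

lemma ferryLoops_agree (A : List Int) (L : Int) (hL : 0 ≤ L) :
    ∀ (ks : List Int), (∀ k ∈ ks, 0 ≤ k ∧ k.toNat ≤ A.length) →
      ∀ memo, GoodMemo A memo → ferryLoopA A L ks memo = ferryLoopB L A ks := by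
  intro ks
  induction ks with
  | nil => intro _ memo _; rfl
  | cons k ks ih =>
    intro hks memo hG
    obtain ⟨hk0, hklen⟩ := hks k (List.mem_cons_self ..)
    obtain ⟨h1, hG1⟩ := ferryRecA_correct A k.toNat hklen L L memo hG
    have hB := ferryB_check L A k hk0 hL
    rw [ferryLoopA, ferryLoopB, if_neg (by omega : ¬ L < 0)]
    cases hp : (ferryRecA A k.toNat L L memo).1 with
    | true =>
      rw [hp] at h1
      rw [if_pos rfl, if_pos (hB.2 h1.symm)]
    | false =>
      rw [hp] at h1
      have hne : ¬ (ferryDpB L (PySem.List.slice A none (some k)).reverse 0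
          (PySem.Set.ofList [L]) ≠ []) := by
        intro hcontra
        rw [hB.1 hcontra] at h1
        exact absurd h1 (by simp)
      rw [if_neg (by simp), if_neg hne]
      exact ih (fun x hx => hks x (List.mem_cons_of_mem _ hx)) _ hG1

lemma goodMemo_empty (A : List Int) : GoodMemo A PySem.Dict.empty := by
  intro l r k b _ hget
  rw [PySem.Dict.get?_empty] at hget
  cases hget

-- ===== VERDICT (by name: the statement is the Claim_ definition above) =====
theorem ferry_rec_spec : Claim_equal_ferry_rec := by
  intro L N A _ hPre
  obtain ⟨hL, hN, hlen⟩ := hPre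
  unfold Spec_ferry_rec ferry_rec ferry_rec_alt
  apply ferryLoops_agree A L hL
  · intro k hk
    rw [PySem.List.mem_pyRange_neg_one] at hk
    omega
  · exact goodMemo_empty A
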